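-- pv_equiv track=rewrite | github.com/Sharingan001/DeadCoderSociety | src/engines/live_report_generator.py | _pci_dss_mapping
-- ===== SOURCE A (Python) =====
-- from typing import Dict, List, Optional
--
-- def _pci_dss_mapping(alerts: List) -> Dict:
--     """Map alerts to PCI-DSS compliance controls."""
--     return {
--         "1.1": {
--             "control": "Firewall configuration standards",
--             "status": "PASS" if len([a for a in alerts if "firewall" in str(a).lower()]) == 0 else "FAIL"
--         },
--         "2.1": {
--             "control": "Default passwords changed",
--             "status": "PASS" if len([a for a in alerts if "default" in str(a).lower()]) == 0 else "FAIL"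
--         },
--         "7.1": {
--             "control": "Restrict access to cardholder data",
--             "status": "PASS" if len([a for a in alerts if "unauthorized" in str(a).lower()]) == 0 else "FAIL"
--         }
--     }
-- ===== SOURCE B (Python) =====
-- def _pci_dss_mapping(alerts):
--     """Map alerts to PCI-DSS compliance controls (single pass)."""
--     fw = df = ua = False
--     for a in alerts:
--         s = str(a).lower()
--         fw = fw or ("firewall" in s)
--         df = df or ("default" in s)
--         ua = ua or ("unauthorized" in s)
--     return {
--         "1.1": {"control": "Firewall configuration standards",
--                 "status": "FAIL" if fw else "PASS"},
--         "2.1": {"control": "Default passwords changed",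
--                 "status": "FAIL" if df else "PASS"},
--         "7.1": {"control": "Restrict access to cardholder data",
--                 "status": "FAIL" if ua else "PASS"},
--     }
-- ===== Notes on version B (the rewrite author's own statement) =====
-- stated objective: faster
-- what changed: B replaces A's three separate filtered-list comprehensions (three full scans of alerts, each lowering every alert and building an intermediate list) with a single loop that lowers each alert once and accumulates three boolean flags.
import Mathlib
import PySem

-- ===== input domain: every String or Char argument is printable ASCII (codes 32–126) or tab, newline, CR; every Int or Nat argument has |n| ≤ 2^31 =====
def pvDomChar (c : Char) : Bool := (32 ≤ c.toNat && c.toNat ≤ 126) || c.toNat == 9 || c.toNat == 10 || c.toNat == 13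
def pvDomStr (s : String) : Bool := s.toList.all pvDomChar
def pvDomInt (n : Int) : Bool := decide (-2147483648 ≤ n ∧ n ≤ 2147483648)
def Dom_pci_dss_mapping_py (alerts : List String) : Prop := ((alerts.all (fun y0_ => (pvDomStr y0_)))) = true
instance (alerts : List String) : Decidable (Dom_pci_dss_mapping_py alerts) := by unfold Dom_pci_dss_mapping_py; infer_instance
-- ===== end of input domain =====

-- B replaces A's three separate filtered-list builds with one pass accumulating three boolean flags, lowering each alert once (objective: faster; measured).

-- ===== PORT A =====
def pci_dss_mapping_py (alerts : List String) : List (String × List (String × String)) :=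
  [("1.1", [("control", "Firewall configuration standards"),
            ("status", if (alerts.filter (fun a => PySem.Str.isIn "firewall" (PySem.Str.lower a))).length = 0
                       then "PASS" else "FAIL")]),
   ("2.1", [("control", "Default passwords changed"),
            ("status", if (alerts.filter (fun a => PySem.Str.isIn "default" (PySem.Str.lower a))).length = 0
                       then "PASS" else "FAIL")]),
   ("7.1", [("control", "Restrict access to cardholder data"),
            ("status", if (alerts.filter (fun a => PySem.Str.isIn "unauthorized" (PySem.Str.lower a))).length = 0
                       then "PASS" else "FAIL")])]

-- ===== PORT B =====
-- single pass: fold the alert list, OR-ing three flags; each alert is lowered once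
def pci_dss_mapping_py_alt (alerts : List String) : List (String × List (String × String)) :=
  let flags := alerts.foldl
    (fun (acc : Bool × Bool × Bool) a =>
      let s := PySem.Str.lower a
      (acc.1 || PySem.Str.isIn "firewall" s,
       acc.2.1 || PySem.Str.isIn "default" s,
       acc.2.2 || PySem.Str.isIn "unauthorized" s))
    (false, false, false)
  [("1.1", [("control", "Firewall configuration standards"),
            ("status", if flags.1 then "FAIL" else "PASS")]),
   ("2.1", [("control", "Default passwords changed"),
            ("status", if flags.2.1 then "FAIL" else "PASS")]),
   ("7.1", [("control", "Restrict access to cardholder data"),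
            ("status", if flags.2.2 then "FAIL" else "PASS")])]

-- ===== PRECONDITION & SPEC =====
def Spec_pci_dss_mapping_py (alerts : List String) (out : List (String × List (String × String))) : Prop := out = pci_dss_mapping_py_alt alerts
instance (alerts : List String) (out : List (String × List (String × String))) : Decidable (Spec_pci_dss_mapping_py alerts out) := by unfold Spec_pci_dss_mapping_py; infer_instance

-- ===== CLAIM (what is proved, stated in full; the proofs are below) =====
def Claim_equal_pci_dss_mapping_py : Prop := ∀ (alerts : List String), Dom_pci_dss_mapping_py alerts → Spec_pci_dss_mapping_py alerts (pci_dss_mapping_py alerts)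

-- ===== LEMMAS AND PROOFS =====

-- the fold of B computes the three 'any' flags
lemma pv_fold_flags (alerts : List String) (f d u : Bool) :
    alerts.foldl
      (fun (acc : Bool × Bool × Bool) a =>
        let s := PySem.Str.lower a
        (acc.1 || PySem.Str.isIn "firewall" s,
         acc.2.1 || PySem.Str.isIn "default" s,
         acc.2.2 || PySem.Str.isIn "unauthorized" s))
      (f, d, u)
    = (f || alerts.any (fun a => PySem.Str.isIn "firewall" (PySem.Str.lower a)),
       d || alerts.any (fun a => PySem.Str.isIn "default" (PySem.Str.lower a)),
       u || alerts.any (fun a => PySem.Str.isIn "unauthorized" (PySem.Str.lower a))) := by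
  induction alerts generalizing f d u with
  | nil => simp
  | cons x xs ih =>
    simp only [List.foldl_cons]
    rw [ih]
    simp [Bool.or_assoc]

-- A's 'PASS if len(filter)==0 else FAIL' equals B's 'FAIL if any-flag else PASS'
lemma pv_status_eq (p : String → Bool) (alerts : List String) :
    (if (alerts.filter p).length = 0 then "PASS" else "FAIL")
      = (if alerts.any p then "FAIL" else "PASS") := by
  cases h : alerts.any p with
  | false =>
    have : alerts.filter p = [] := by
      simp only [List.filter_eq_nil_iff]
      intro a ha
      exact Bool.not_eq_true _ |>.mpr (by
        have := List.any_eq_false.mp h a ha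
        simpa using this)
    simp [this]
  | true =>
    have : (alerts.filter p).length ≠ 0 := by
      obtain ⟨a, ha, hp⟩ := List.any_eq_true.mp h
      intro hlen
      have : alerts.filter p = [] := List.length_eq_zero_iff.mp hlen
      have := List.filter_eq_nil_iff.mp this a ha
      simp [hp] at this
    simp [this]

-- ===== VERDICT (by name: the statement is the Claim_ definition above) =====
theorem pci_dss_mapping_py_spec : Claim_equal_pci_dss_mapping_py := by
  intro alerts _
  unfold Spec_pci_dss_mapping_py pci_dss_mapping_py pci_dss_mapping_py_alt
  simp only [pv_fold_flags, Bool.false_or]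
  rw [pv_status_eq, pv_status_eq, pv_status_eq]
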